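-- pv_equiv track=rewrite | github.com/wlgud0402/dailyalgo | programmers/level2/옹알이(1).py | solution
-- ===== SOURCE A (Python) =====
-- from itertools import permutations
--
-- def solution(babblings):
--     can_babbling_count = 0
--     can_babbling_words = ["aya", "ye", "woo", "ma"]
--     all_can_babbling_words_permutations = set()
--
--     for i in range(1, len(can_babbling_words)+1):
--         for j in permutations(can_babbling_words, i):
--             all_can_babbling_words_permutations.add(''.join(j))
--
--     for babbling in babblings:
--         if babbling in all_can_babbling_words_permutations:
--             can_babbling_count += 1
--
--     return can_babbling_count
-- ===== SOURCE B (Python) =====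
-- def solution(babblings):
--     def ok(s, used):
--         if not s:
--             return used != 0
--         return ((not used & 1 and s.startswith("aya") and ok(s[3:], used | 1))
--              or (not used & 2 and s.startswith("ye") and ok(s[2:], used | 2))
--              or (not used & 4 and s.startswith("woo") and ok(s[3:], used | 4))
--              or (not used & 8 and s.startswith("ma") and ok(s[2:], used | 8)))
--     return sum(1 for b in babblings if ok(b, 0))
-- ===== Notes on version B (the rewrite author's own statement) =====
-- stated objective: alternative
-- what changed: A precomputes the set of all 64 joins of permutations of 1..4 allowed words and tests each babbling by set membership; B drops the precomputation entirely and decides each babbling with a recursive backtracking parser that peels a not-yet-used allowed word (tracked in a bitmask) off the front and recurses on the suffix.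
import Mathlib
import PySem

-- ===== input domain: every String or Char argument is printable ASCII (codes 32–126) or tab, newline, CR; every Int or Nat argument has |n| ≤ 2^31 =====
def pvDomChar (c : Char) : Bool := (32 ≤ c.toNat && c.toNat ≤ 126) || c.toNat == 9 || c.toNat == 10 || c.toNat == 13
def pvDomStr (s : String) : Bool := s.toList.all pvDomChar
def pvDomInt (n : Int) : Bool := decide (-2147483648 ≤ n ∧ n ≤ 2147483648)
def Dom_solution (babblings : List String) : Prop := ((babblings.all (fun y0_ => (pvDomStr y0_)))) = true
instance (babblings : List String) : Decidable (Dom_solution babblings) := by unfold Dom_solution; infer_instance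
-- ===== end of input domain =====

-- B replaces A's precomputed 64-element permutation set by a direct backtracking
-- parser with a bitmask of already-used words (objective: alternative decomposition).

-- ===== PORT A =====
-- A precomputes the set of joins of all permutations of 1..4 of the allowed words.
def pvCanWords : List String := ["aya", "ye", "woo", "ma"]

def pvPermSet : PySem.Set String :=
  (PySem.List.pyRange 1 ((pvCanWords.length : Int) + 1) 1).foldl
    (fun acc i => (PySem.List.permutations pvCanWords i.toNat).foldl
        (fun acc j => PySem.Set.add acc (PySem.Str.join "" j)) acc)
    PySem.Set.empty

def solution (babblings : List String) : Int :=
  babblings.foldl (fun cnt b => if PySem.Set.contains pvPermSet b then cnt + 1 else cnt) 0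

-- ===== PORT B =====
-- B's recursive matcher: try each not-yet-used word (bitmask `used`) as a prefix,
-- recurse on the suffix; the empty string parses iff at least one word was used.
def pvOk : List Char → Nat → Bool
  | [], used => used != 0
  | c :: rest, used =>
    ((used &&& 1 == 0) && (['a','y','a'].isPrefixOf (c :: rest)) && pvOk ((c :: rest).drop 3) (used ||| 1)) ||
    ((used &&& 2 == 0) && (['y','e'].isPrefixOf (c :: rest)) && pvOk ((c :: rest).drop 2) (used ||| 2)) ||
    ((used &&& 4 == 0) && (['w','o','o'].isPrefixOf (c :: rest)) && pvOk ((c :: rest).drop 3) (used ||| 4)) ||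
    ((used &&& 8 == 0) && (['m','a'].isPrefixOf (c :: rest)) && pvOk ((c :: rest).drop 2) (used ||| 8))
termination_by s _ => s.length
decreasing_by all_goals simp [List.length_drop]

def solution_alt (babblings : List String) : Int :=
  (babblings.countP (fun b => pvOk b.toList 0) : Int)

-- ===== PRECONDITION & SPEC =====
def Spec_solution (babblings : List String) (out : Int) : Prop := out = solution_alt babblings
instance (babblings : List String) (out : Int) : Decidable (Spec_solution babblings out) := by unfold Spec_solution; infer_instance

-- ===== CLAIM (what is proved, stated in full; the proofs are below) =====
def Claim_equal_solution : Prop := ∀ (babblings : List String), Dom_solution babblings → Spec_solution babblings (solution babblings)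

-- ===== LEMMAS AND PROOFS =====

-- Ghost set: all strings parseable from mask `used` within `n` further words.
def gset : Nat → Nat → List (List Char)
  | 0, used => if used ≠ 0 then [[]] else []
  | n+1, used =>
    (if used ≠ 0 then [[]] else []) ++
    (if used &&& 1 == 0 then (gset n (used ||| 1)).map (['a','y','a'] ++ ·) else []) ++
    (if used &&& 2 == 0 then (gset n (used ||| 2)).map (['y','e'] ++ ·) else []) ++
    (if used &&& 4 == 0 then (gset n (used ||| 4)).map (['w','o','o'] ++ ·) else []) ++
    (if used &&& 8 == 0 then (gset n (used ||| 8)).map (['m','a'] ++ ·) else [])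

def freeCnt (used : Nat) : Nat :=
  (if used &&& 1 == 0 then 1 else 0) + (if used &&& 2 == 0 then 1 else 0) +
  (if used &&& 4 == 0 then 1 else 0) + (if used &&& 8 == 0 then 1 else 0)

theorem pv_mem_ite_nil {a : Type} (P : Prop) [Decidable P] (l : List a) (x : a) :
    x ∈ (if P then l else []) ↔ P ∧ x ∈ l := by
  split <;> simp_all

theorem pv_mem_map_append (w s : List Char) (t : List (List Char)) :
    s ∈ t.map (fun x => w ++ x) ↔ (w.isPrefixOf s = true ∧ s.drop w.length ∈ t) := by
  simp only [List.mem_map]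
  constructor
  · rintro ⟨x, hx, rfl⟩
    exact ⟨List.isPrefixOf_iff_prefix.mpr ⟨x, rfl⟩, by simpa [List.drop_left] using hx⟩
  · rintro ⟨hp, hd⟩
    obtain ⟨x, rfl⟩ := List.isPrefixOf_iff_prefix.mp hp
    exact ⟨x, by simpa [List.drop_left] using hd, rfl⟩

theorem pv_nil_mem_gset (n used : Nat) : [] ∈ gset n used ↔ used ≠ 0 := by
  cases n <;> simp [gset]

theorem pv_or_and_self (u b : Nat) (hb : b ≠ 0) : (u ||| b) &&& b ≠ 0 := by
  rw [Nat.and_or_distrib_right, Nat.and_self]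
  intro h
  exact hb (Nat.le_zero.mp (h ▸ Nat.right_le_or))

theorem pv_or_and_other (u a b : Nat) (h : a &&& b = 0) : (u ||| a) &&& b = u &&& b := by
  rw [Nat.and_or_distrib_right, h, Nat.or_zero]

theorem pv_freeCnt_or1 (u : Nat) (h : u &&& 1 = 0) : freeCnt (u ||| 1) < freeCnt u := by
  unfold freeCnt
  simp only [beq_iff_eq, pv_or_and_other u 1 2 (by decide), pv_or_and_other u 1 4 (by decide),
    pv_or_and_other u 1 8 (by decide)]
  rw [if_pos h, if_neg (pv_or_and_self u 1 (by decide))]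
  split_ifs <;> omega

theorem pv_freeCnt_or2 (u : Nat) (h : u &&& 2 = 0) : freeCnt (u ||| 2) < freeCnt u := by
  unfold freeCnt
  simp only [beq_iff_eq, pv_or_and_other u 2 1 (by decide), pv_or_and_other u 2 4 (by decide),
    pv_or_and_other u 2 8 (by decide)]
  rw [if_pos h, if_neg (pv_or_and_self u 2 (by decide))]
  split_ifs <;> omega

theorem pv_freeCnt_or4 (u : Nat) (h : u &&& 4 = 0) : freeCnt (u ||| 4) < freeCnt u := by
  unfold freeCnt
  simp only [beq_iff_eq, pv_or_and_other u 4 1 (by decide), pv_or_and_other u 4 2 (by decide),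
    pv_or_and_other u 4 8 (by decide)]
  rw [if_pos h, if_neg (pv_or_and_self u 4 (by decide))]
  split_ifs <;> omega

theorem pv_freeCnt_or8 (u : Nat) (h : u &&& 8 = 0) : freeCnt (u ||| 8) < freeCnt u := by
  unfold freeCnt
  simp only [beq_iff_eq, pv_or_and_other u 8 1 (by decide), pv_or_and_other u 8 2 (by decide),
    pv_or_and_other u 8 4 (by decide)]
  rw [if_pos h, if_neg (pv_or_and_self u 8 (by decide))]
  split_ifs <;> omega

theorem pv_freeCnt_zero (used : Nat) (h : freeCnt used = 0) :
    used &&& 1 ≠ 0 ∧ used &&& 2 ≠ 0 ∧ used &&& 4 ≠ 0 ∧ used &&& 8 ≠ 0 := by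
  unfold freeCnt at h
  split_ifs at h <;> simp_all

theorem pv_ok_iff : ∀ n used, freeCnt used ≤ n → ∀ s, (pvOk s used = true ↔ s ∈ gset n used) := by
  intro n
  induction n with
  | zero =>
    intro used hf s
    obtain ⟨h1, h2, h4, h8⟩ := pv_freeCnt_zero used (Nat.le_zero.mp hf)
    have hu : used ≠ 0 := by intro h; subst h; simp at h1
    cases s with
    | nil => simp [pvOk, gset, hu, bne]
    | cons c r =>
      simp only [pvOk, Bool.or_eq_true, Bool.and_eq_true, beq_iff_eq, gset, if_pos hu,
        List.mem_singleton]
      constructor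
      · rintro (((⟨⟨hA, -⟩, -⟩ | ⟨⟨hA, -⟩, -⟩) | ⟨⟨hA, -⟩, -⟩) | ⟨⟨hA, -⟩, -⟩)
        exacts [absurd hA h1, absurd hA h2, absurd hA h4, absurd hA h8]
      · intro h
        simp at h
  | succ n ih =>
    intro used hf s
    cases s with
    | nil => simp [pvOk, pv_nil_mem_gset, bne]
    | cons c r =>
      simp only [pvOk, Bool.or_eq_true, Bool.and_eq_true, beq_iff_eq, gset, List.mem_append,
        pv_mem_ite_nil, pv_mem_map_append, List.mem_singleton, List.length_cons, List.length_nil]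
      constructor
      · rintro (((⟨⟨hA, hP⟩, hO⟩ | ⟨⟨hA, hP⟩, hO⟩) | ⟨⟨hA, hP⟩, hO⟩) | ⟨⟨hA, hP⟩, hO⟩)
        · exact Or.inl (Or.inl (Or.inl (Or.inr ⟨hA, hP, (ih _ (by have := pv_freeCnt_or1 _ hA; omega) _).mp hO⟩)))
        · exact Or.inl (Or.inl (Or.inr ⟨hA, hP, (ih _ (by have := pv_freeCnt_or2 _ hA; omega) _).mp hO⟩))
        · exact Or.inl (Or.inr ⟨hA, hP, (ih _ (by have := pv_freeCnt_or4 _ hA; omega) _).mp hO⟩)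
        · exact Or.inr ⟨hA, hP, (ih _ (by have := pv_freeCnt_or8 _ hA; omega) _).mp hO⟩
      · rintro ((((⟨-, h⟩ | ⟨hA, hP, hM⟩) | ⟨hA, hP, hM⟩) | ⟨hA, hP, hM⟩) | ⟨hA, hP, hM⟩)
        · exact absurd h (by simp)
        · exact Or.inl (Or.inl (Or.inl ⟨⟨hA, hP⟩, (ih _ (by have := pv_freeCnt_or1 _ hA; omega) _).mpr hM⟩))
        · exact Or.inl (Or.inl (Or.inr ⟨⟨hA, hP⟩, (ih _ (by have := pv_freeCnt_or2 _ hA; omega) _).mpr hM⟩))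
        · exact Or.inl (Or.inr ⟨⟨hA, hP⟩, (ih _ (by have := pv_freeCnt_or4 _ hA; omega) _).mpr hM⟩)
        · exact Or.inr ⟨⟨hA, hP⟩, (ih _ (by have := pv_freeCnt_or8 _ hA; omega) _).mpr hM⟩

set_option maxRecDepth 10000 in
theorem pv_permSet_sub : pvPermSet.map String.toList ⊆ gset 4 0 ∧ gset 4 0 ⊆ pvPermSet.map String.toList := by
  decide

theorem pv_contains_iff (b : String) : (PySem.Set.contains pvPermSet b = true) ↔ b.toList ∈ gset 4 0 := by
  rw [PySem.Set.contains_iff]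
  constructor
  · intro hb
    exact pv_permSet_sub.1 (List.mem_map_of_mem hb)
  · intro hb
    obtain ⟨a, ha, hab⟩ := List.mem_map.mp (pv_permSet_sub.2 hb)
    exact String.toList_injective hab ▸ ha

theorem pv_foldl_count (p : String → Bool) : ∀ (bs : List String) (acc : Int),
    bs.foldl (fun c b => if p b then c + 1 else c) acc = acc + (bs.countP p : Int) := by
  intro bs
  induction bs with
  | nil => simp
  | cons b t ih =>
    intro acc
    cases hp : p b <;> simp [List.foldl_cons, hp, ih] <;> omega

-- ===== VERDICT (by name: the statement is the Claim_ definition above) =====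
theorem solution_spec : Claim_equal_solution := by
  intro bs _
  unfold Spec_solution solution solution_alt
  rw [pv_foldl_count]
  rw [List.countP_congr (fun b _ =>
    (pv_contains_iff b).trans ((pv_ok_iff 4 0 (by decide) b.toList).symm))]
  simp
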